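-- pv_equiv track=rewrite | github.com/ayvid2123/t | maindivya_segmentation auto undo zoom (7).py | fix_polygon_with_hole
-- ===== SOURCE A (Python) =====
-- def fix_polygon_with_hole(polygon):
--     # Find the outer boundary of the polygon
--     outer_boundary = []
--     inner_boundary = []
--     for i in range(len(polygon)):
--         if i < len(polygon) - 1:
--             dx1 = polygon[i+1][0] - polygon[i][0]
--             dy1 = polygon[i+1][1] - polygon[i][1]
--         else:
--             dx1 = polygon[0][0] - polygon[i][0]
--             dy1 = polygon[0][1] - polygon[i][1]
--         if i > 0:
--             dx2 = polygon[i][0] - polygon[i-1][0]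
--             dy2 = polygon[i][1] - polygon[i-1][1]
--         else:
--             dx2 = polygon[i][0] - polygon[len(polygon)-1][0]
--             dy2 = polygon[i][1] - polygon[len(polygon)-1][1]
--         cross_product = dx1 * dy2 - dy1 * dx2
--         if cross_product < 0:
--             outer_boundary.append(polygon[i])
--         else:
--             inner_boundary.append(polygon[i])
--     # Reverse the order of the points in the hole
--     inner_boundary.reverse()
--     # Add the hole as a new polygon to the original polygon
--     polygon_with_hole = [outer_boundary, inner_boundary]
--     # Remove the original hole from the polygon
--     polygon_with_hole.remove([])
--     return polygon_with_hole
-- ===== SOURCE B (Python) =====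
-- def fix_polygon_with_hole(polygon):
--     # Same return value as A wherever A returns; B classifies the whole
--     # polygon at once instead of partitioning vertex by vertex.
--     n = len(polygon)
--
--     def cross(i):
--         cur = polygon[i]
--         nxt = polygon[(i + 1) % n]
--         prv = polygon[i - 1]
--         return (nxt[0] - cur[0]) * (cur[1] - prv[1]) - (nxt[1] - cur[1]) * (cur[0] - prv[0])
--
--     if all(cross(i) < 0 for i in range(n)):
--         return [list(polygon)]
--     return [list(reversed(polygon))]
-- ===== Notes on version B (the rewrite author's own statement) =====
-- stated objective: simpler
-- what changed: A partitions vertices one by one into two appended boundary lists and then relies on removing the empty partition at the end; B observes that A only returns when every cross product has the same sign, so it performs one all() sign test over the precomputed cross products and returns the whole polygon (or its reversal) directly, never building partition lists.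
import Mathlib
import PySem

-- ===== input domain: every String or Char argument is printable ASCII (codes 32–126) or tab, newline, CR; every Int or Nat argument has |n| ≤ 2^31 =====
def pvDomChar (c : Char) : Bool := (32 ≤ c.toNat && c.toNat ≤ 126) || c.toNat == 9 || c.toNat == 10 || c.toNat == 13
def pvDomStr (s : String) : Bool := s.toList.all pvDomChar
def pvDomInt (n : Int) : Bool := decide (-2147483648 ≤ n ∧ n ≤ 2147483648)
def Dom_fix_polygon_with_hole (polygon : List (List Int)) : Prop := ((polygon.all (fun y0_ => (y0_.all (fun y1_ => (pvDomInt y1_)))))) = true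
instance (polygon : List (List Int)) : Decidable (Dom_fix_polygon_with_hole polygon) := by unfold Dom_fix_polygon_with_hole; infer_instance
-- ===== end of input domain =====

-- B replaces A's vertex-by-vertex partition loop (plus the final remove of the empty partition) by one uniform
-- cross-product sign test and returns the polygon or its reversal whole (objective: simpler).

-- ===== PORT A =====
-- All polygon-level indices A uses (i, i+1, i-1, 0, n-1) are natural and in range
-- for i in range(n), so List.getD is exact there; point coordinates p[0], p[1] use
-- getD 0 under Pre_ (which demands every point has length ≥ 2, where Python returns).
def pvStepA (polygon : List (List Int)) (acc : List (List Int) × List (List Int)) (i : Nat) :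
    List (List Int) × List (List Int) :=
  let n := polygon.length
  let d1 :=
    if (i : Int) < (n : Int) - 1 then
      (((polygon.getD (i+1) []).getD 0 0) - ((polygon.getD i []).getD 0 0),
       ((polygon.getD (i+1) []).getD 1 0) - ((polygon.getD i []).getD 1 0))
    else
      (((polygon.getD 0 []).getD 0 0) - ((polygon.getD i []).getD 0 0),
       ((polygon.getD 0 []).getD 1 0) - ((polygon.getD i []).getD 1 0))
  let d2 :=
    if 0 < i then
      (((polygon.getD i []).getD 0 0) - ((polygon.getD (i-1) []).getD 0 0),
       ((polygon.getD i []).getD 1 0) - ((polygon.getD (i-1) []).getD 1 0))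
    else
      (((polygon.getD i []).getD 0 0) - ((polygon.getD (n-1) []).getD 0 0),
       ((polygon.getD i []).getD 1 0) - ((polygon.getD (n-1) []).getD 1 0))
  let cross := d1.1 * d2.2 - d1.2 * d2.1
  if cross < 0 then (acc.1 ++ [polygon.getD i []], acc.2)
  else (acc.1, acc.2 ++ [polygon.getD i []])

def fix_polygon_with_hole (polygon : List (List Int)) : List (List (List Int)) :=
  let r := (List.range polygon.length).foldl (pvStepA polygon) ([], [])
  let pwh := [r.1, r.2.reverse]
  match PySem.List.remove? pwh ([] : List (List Int)) with
  | some res => res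
  | none => pwh   -- Python raises ValueError here; excluded by Pre_

-- ===== PORT B =====
-- cross(i) of Source B: polygon[i-1] may be index -1 (Python wrap), hence pyGetD;
-- the other indices are natural and in range.
def pvCross (polygon : List (List Int)) (i : Nat) : Int :=
  let n := polygon.length
  let cur := polygon.getD i []
  let nxt := polygon.getD ((i+1) % n) []
  let prv := PySem.List.pyGetD polygon ((i : Int) - 1) []
  (nxt.getD 0 0 - cur.getD 0 0) * (cur.getD 1 0 - prv.getD 1 0)
    - (nxt.getD 1 0 - cur.getD 1 0) * (cur.getD 0 0 - prv.getD 0 0)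

def fix_polygon_with_hole_alt (polygon : List (List Int)) : List (List (List Int)) :=
  if (List.range polygon.length).all (fun i => decide (pvCross polygon i < 0)) then
    [polygon]
  else
    [polygon.reverse]

-- ===== PRECONDITION & SPEC =====
-- Pre_ excludes exactly the inputs where A raises: a point with fewer than two
-- coordinates (IndexError) and mixed cross-product signs, where both partition
-- lists are non-empty and the final remove of the empty partition raises ValueError.
def Pre_fix_polygon_with_hole (polygon : List (List Int)) : Prop :=
  (∀ p ∈ polygon, 2 ≤ p.length) ∧
  ((∀ i < polygon.length, pvCross polygon i < 0) ∨ (∀ i < polygon.length, 0 ≤ pvCross polygon i))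
instance (polygon : List (List Int)) : Decidable (Pre_fix_polygon_with_hole polygon) := by
  unfold Pre_fix_polygon_with_hole; infer_instance

def pvWitness_fix_polygon_with_hole : List (List Int) := [[0,0],[4,0],[0,4]]

def Spec_fix_polygon_with_hole (polygon : List (List Int)) (out : List (List (List Int))) : Prop := out = fix_polygon_with_hole_alt polygon
instance (polygon : List (List Int)) (out : List (List (List Int))) : Decidable (Spec_fix_polygon_with_hole polygon out) := by unfold Spec_fix_polygon_with_hole; infer_instance

-- ===== CLAIM (what is proved, stated in full; the proofs are below) =====
def Claim_equal_fix_polygon_with_hole : Prop := ∀ (polygon : List (List Int)), Dom_fix_polygon_with_hole polygon → Pre_fix_polygon_with_hole polygon → Spec_fix_polygon_with_hole polygon (fix_polygon_with_hole polygon)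

-- ===== LEMMAS AND PROOFS =====

-- A's branchy cross product at i equals Source B's modular one.
lemma pvStepA_eq (polygon : List (List Int)) (acc : List (List Int) × List (List Int))
    (i : Nat) (h : i < polygon.length) :
    pvStepA polygon acc i =
      if pvCross polygon i < 0 then (acc.1 ++ [polygon.getD i []], acc.2)
      else (acc.1, acc.2 ++ [polygon.getD i []]) := by
  have hne : polygon ≠ [] := by intro e; simp [e] at h
  unfold pvStepA pvCross
  by_cases h1 : i + 1 < polygon.length
  · have e1 : (i + 1) % polygon.length = i + 1 := Nat.mod_eq_of_lt h1
    by_cases h0 : 0 < i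
    · have e2 : PySem.List.pyGetD polygon ((i : Int) - 1) [] = polygon.getD (i - 1) [] := by
        have : (i : Int) - 1 = ((i - 1 : Nat) : Int) := by omega
        rw [this, PySem.List.pyGetD_natCast]
      simp only [e1, e2, if_pos h0, if_pos (show (i : Int) < (polygon.length : Int) - 1 by omega)]
    · have hi0 : i = 0 := by omega
      have e2 : PySem.List.pyGetD polygon ((i : Int) - 1) [] = polygon.getD (polygon.length - 1) [] := by
        subst hi0
        rw [show ((0 : Nat) : Int) - 1 = -1 by norm_num, PySem.List.pyGetD_neg_one polygon [] hne]
        rw [List.getLast_eq_getElem, List.getD_eq_getElem polygon [] (by omega)]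
      simp only [e1, e2, if_neg h0, if_pos (show (i : Int) < (polygon.length : Int) - 1 by omega)]
  · have hi : i = polygon.length - 1 := by omega
    have e1 : (i + 1) % polygon.length = 0 := by
      rw [show i + 1 = polygon.length by omega, Nat.mod_self]
    have hnot : ¬ ((i : Int) < (polygon.length : Int) - 1) := by omega
    by_cases h0 : 0 < i
    · have e2 : PySem.List.pyGetD polygon ((i : Int) - 1) [] = polygon.getD (i - 1) [] := by
        have : (i : Int) - 1 = ((i - 1 : Nat) : Int) := by omega
        rw [this, PySem.List.pyGetD_natCast]
      simp only [e1, e2, if_pos h0, if_neg hnot]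
    · have hi0 : i = 0 := by omega
      have e2 : PySem.List.pyGetD polygon ((i : Int) - 1) [] = polygon.getD (polygon.length - 1) [] := by
        subst hi0
        rw [show ((0 : Nat) : Int) - 1 = -1 by norm_num, PySem.List.pyGetD_neg_one polygon [] hne]
        rw [List.getLast_eq_getElem, List.getD_eq_getElem polygon [] (by omega)]
      simp only [e1, e2, if_neg h0, if_neg hnot]

lemma take_succ_getD (polygon : List (List Int)) (m : Nat) (h : m < polygon.length) :
    polygon.take m ++ [polygon.getD m []] = polygon.take (m + 1) := by
  rw [List.take_add_one, List.getElem?_eq_getElem h, List.getD_eq_getElem polygon [] h]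
  simp

lemma loop_all_neg (polygon : List (List Int))
    (h : ∀ i < polygon.length, pvCross polygon i < 0) :
    ∀ m, m ≤ polygon.length →
      (List.range m).foldl (pvStepA polygon) ([], []) = (polygon.take m, []) := by
  intro m
  induction m with
  | zero => intro _; simp
  | succ k ih =>
    intro hk
    rw [List.range_succ, List.foldl_append, ih (by omega)]
    simp only [List.foldl_cons, List.foldl_nil]
    rw [pvStepA_eq polygon _ k (by omega), if_pos (h k (by omega)),
      take_succ_getD polygon k (by omega)]

lemma loop_all_nonneg (polygon : List (List Int))
    (h : ∀ i < polygon.length, 0 ≤ pvCross polygon i) :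
    ∀ m, m ≤ polygon.length →
      (List.range m).foldl (pvStepA polygon) ([], []) = ([], polygon.take m) := by
  intro m
  induction m with
  | zero => intro _; simp
  | succ k ih =>
    intro hk
    rw [List.range_succ, List.foldl_append, ih (by omega)]
    simp only [List.foldl_cons, List.foldl_nil]
    rw [pvStepA_eq polygon _ k (by omega), if_neg (by have := h k (by omega); omega),
      take_succ_getD polygon k (by omega)]

-- ===== VERDICT (by name: the statement is the Claim_ definition above) =====
theorem fix_polygon_with_hole_spec : Claim_equal_fix_polygon_with_hole := by
  intro polygon _ hpre
  unfold Spec_fix_polygon_with_hole fix_polygon_with_hole fix_polygon_with_hole_alt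
  rcases hpre.2 with hneg | hnn
  · rw [loop_all_neg polygon hneg polygon.length le_rfl]
    have hall : (List.range polygon.length).all (fun i => decide (pvCross polygon i < 0)) = true := by
      simp only [List.all_eq_true, List.mem_range, decide_eq_true_eq]
      exact hneg
    rw [if_pos hall]
    rcases eq_or_ne polygon [] with he | he
    · subst he; decide
    · simp only [List.take_length, List.reverse_nil]
      rw [PySem.List.remove?_cons_of_ne [[]] he, PySem.List.remove?_cons_self]
      rfl
  · rcases eq_or_ne polygon [] with he | he
    · subst he; decide
    · rw [loop_all_nonneg polygon hnn polygon.length le_rfl]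
      have hlen : 0 < polygon.length := List.length_pos_iff.mpr he
      have hfalse : (List.range polygon.length).all (fun i => decide (pvCross polygon i < 0)) = false := by
        simp only [List.all_eq_false, List.mem_range]
        exact ⟨0, hlen, by simp [not_lt, hnn 0 hlen]⟩
      rw [if_neg (by simp [hfalse])]
      simp only [List.take_length]
      rw [PySem.List.remove?_cons_self]
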